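-- pv_equiv track=rewrite | github.com/kvcop/ai-kb-assistant | tg_bot/config.py | _clean_increasing_positive
-- ===== SOURCE A (Python) =====
-- def _clean_increasing_positive(values: list[int]) -> list[int]:
--     out: list[int] = []
--     last = -1
--     for v in values:
--         try:
--             n = int(v)
--         except Exception:
--             continue
--         if n <= 0:
--             continue
--         if n <= last:
--             continue
--         out.append(n)
--         last = n
--     return out
-- ===== SOURCE B (Python) =====
-- def _clean_increasing_positive(values: list[int]) -> list[int]:
--     # pass 1: valid positive ints
--     nums: list[int] = []
--     for v in values:
--         try:
--             n = int(v)
--         except Exception: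
--             continue
--         if n > 0:
--             nums.append(n)
--     # pass 2: strict left-to-right maxima
--     out: list[int] = []
--     m = 0
--     for n in nums:
--         if n > m:
--             out.append(n)
--             m = n
--     return out
-- ===== Notes on version B (the rewrite author's own statement) =====
-- stated objective: alternative
-- what changed: Replaces A's single fused loop with sentinel last=-1 by two separate passes: first collect the positive ints, then keep the strict left-to-right maxima against a running maximum starting at 0.
import Mathlib
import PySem

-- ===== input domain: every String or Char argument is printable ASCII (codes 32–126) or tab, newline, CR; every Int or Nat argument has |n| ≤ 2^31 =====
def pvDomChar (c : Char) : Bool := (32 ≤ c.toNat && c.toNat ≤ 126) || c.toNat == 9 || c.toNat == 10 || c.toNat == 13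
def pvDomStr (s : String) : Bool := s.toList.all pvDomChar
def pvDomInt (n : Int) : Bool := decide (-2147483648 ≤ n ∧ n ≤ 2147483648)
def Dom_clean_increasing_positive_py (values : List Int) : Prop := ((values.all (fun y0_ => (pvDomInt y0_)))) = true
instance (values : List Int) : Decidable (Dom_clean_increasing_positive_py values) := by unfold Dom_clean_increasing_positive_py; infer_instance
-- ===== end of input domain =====

-- B is an alternative decomposition of A (two passes instead of one fused loop); return values proved equal.

-- ===== PORT A =====
-- A's single loop over values with accumulators out (appended at the back) and last (sentinel -1).
def pyALoop : List Int → List Int → Int → List Int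
  | [], out, _ => out
  | v :: rest, out, last =>
    let n := v            -- int(v) on an int is the identity; the except branch is unreachable
    if n ≤ 0 then pyALoop rest out last
    else if n ≤ last then pyALoop rest out last
    else pyALoop rest (out ++ [n]) n

def clean_increasing_positive_py (values : List Int) : List Int :=
  pyALoop values [] (-1)

-- ===== PORT B =====
-- pass 1 of Source B: collect the positive ints
def altNums : List Int → List Int
  | [] => []
  | v :: rest => if 0 < v then v :: altNums rest else altNums rest

-- pass 2 of Source B: keep elements strictly above the running maximum m (starts at 0)
def altScan : Int → List Int → List Int
  | _, [] => []
  | m, n :: rest => if m < n then n :: altScan n rest else altScan m rest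

def clean_increasing_positive_py_alt (values : List Int) : List Int :=
  altScan 0 (altNums values)

-- ===== PRECONDITION & SPEC =====
def Spec_clean_increasing_positive_py (values : List Int) (out : List Int) : Prop := out = clean_increasing_positive_py_alt values
instance (values : List Int) (out : List Int) : Decidable (Spec_clean_increasing_positive_py values out) := by unfold Spec_clean_increasing_positive_py; infer_instance

-- ===== CLAIM (what is proved, stated in full; the proofs are below) =====
def Claim_equal_clean_increasing_positive_py : Prop := ∀ (values : List Int), Dom_clean_increasing_positive_py values → Spec_clean_increasing_positive_py values (clean_increasing_positive_py values)

-- ===== LEMMAS AND PROOFS =====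
-- Loop invariant: A's fused loop equals out ++ (B's scan started at max last 0 over the positives).
theorem pyALoop_eq (l : List Int) : ∀ (out : List Int) (last : Int),
    pyALoop l out last = out ++ altScan (max last 0) (altNums l) := by
  induction l with
  | nil => intro out last; simp [pyALoop, altNums, altScan]
  | cons v rest ih =>
    intro out last
    by_cases hv : v ≤ 0
    · have : ¬ (0 < v) := by omega
      simp [pyALoop, hv, altNums, this, ih]
    · have h0 : 0 < v := by omega
      by_cases hl : v ≤ last
      · have : ¬ (max last 0 < v) := by omega
        simp [pyALoop, hv, hl, altNums, h0, altScan, this, ih]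
      · have hm : max last 0 < v := by omega
        have hmax : max v 0 = v := by omega
        simp [pyALoop, hv, hl, altNums, h0, altScan, hm, ih, hmax]

-- ===== VERDICT (by name: the statement is the Claim_ definition above) =====
theorem clean_increasing_positive_py_spec : Claim_equal_clean_increasing_positive_py := by
  intro values _
  unfold Spec_clean_increasing_positive_py clean_increasing_positive_py clean_increasing_positive_py_alt
  simpa using pyALoop_eq values [] (-1)
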